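-- pv_equiv track=rewrite | github.com/KhlanMyk/Creating_tabs_for_guitar | tab_refiner.py | _format_tabs_from_grid
-- ===== SOURCE A (Python) =====
-- def _format_tabs_from_grid(grid: list[list[str]], cols: int) -> str:
--     """Format a 6-row token grid into the timing-proportional tab format.
--
--     Each column = one 16th-note slot.
--     16 slots per measure (4 beats × 4 sixteenths).
--     2 measures per display line.
--     """
--     string_names = ["e", "B", "G", "D", "A", "E"]
--     slots_per_measure = 16
--     beats_per_measure = 4
--     slots_per_beat = 4
--     measures_per_line = 2
--
--     num_measures = max(1, (cols + slots_per_measure - 1) // slots_per_measure)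
--
--     output: list[str] = []
--
--     for line_start in range(0, num_measures, measures_per_line):
--         line_end = min(line_start + measures_per_line, num_measures)
--
--         # Beat markers
--         beat_line = "  "
--         for m_idx in range(line_start, line_end):
--             for beat in range(beats_per_measure):
--                 beat_line += str(beat + 1)
--                 beat_line += " " * (slots_per_beat - 1)
--             beat_line += " "
--         beat_line = beat_line.rstrip()
--         if beat_line.strip():
--             output.append(beat_line)
--
--         # String lines
--         for row in range(6):
--             line = f"{string_names[row]}|"
--             for m_idx in range(line_start, line_end):
--                 m_start = m_idx * slots_per_measure
--                 for slot_offset in range(slots_per_measure):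
--                     abs_slot = m_start + slot_offset
--                     if abs_slot < cols:
--                         token = grid[row][abs_slot]
--                         fret_str = "-" if token == "--" else token
--                     else:
--                         fret_str = "-"
--                     line += fret_str
--                 line += "|"
--             output.append(line)
--         output.append("")
--
--     return "\n".join(output).rstrip()
-- ===== SOURCE B (Python) =====
-- def _format_tabs_from_grid(grid: list[list[str]], cols: int) -> str:
--     string_names = ["e", "B", "G", "D", "A", "E"]
--     num_measures = max(1, (cols + 15) // 16)
--     beat_frag = "1   2   3   4    "
--
--     def render(row, m):
--         cells = []
--         for off in range(16):
--             s = m * 16 + off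
--             if s < cols:
--                 token = grid[row][s]
--                 cells.append("-" if token == "--" else token)
--             else:
--                 cells.append("-")
--         return "".join(cells)
--
--     blocks = [(beat_frag, [render(row, m) for row in range(6)])
--               for m in range(num_measures)]
--
--     lines = []
--     rest = blocks
--     while rest:
--         chunk, rest = rest[:2], rest[2:]
--         lines.append(("  " + "".join(b for b, _ in chunk)).rstrip())
--         for row in range(6):
--             lines.append(string_names[row] + "|" + "|".join(rows[row] for _, rows in chunk) + "|")
--         lines.append("")
--     return "\n".join(lines).rstrip()
-- ===== Notes on version B (the rewrite author's own statement) =====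
-- stated objective: alternative
-- what changed: A interleaves everything in one pass of nested loops per display line; B first renders each measure once into a reusable block (beat fragment + six 16-slot string fragments) and then a second pass consumes the block list two at a time, assembling each display line by joining fragments.
import Mathlib
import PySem

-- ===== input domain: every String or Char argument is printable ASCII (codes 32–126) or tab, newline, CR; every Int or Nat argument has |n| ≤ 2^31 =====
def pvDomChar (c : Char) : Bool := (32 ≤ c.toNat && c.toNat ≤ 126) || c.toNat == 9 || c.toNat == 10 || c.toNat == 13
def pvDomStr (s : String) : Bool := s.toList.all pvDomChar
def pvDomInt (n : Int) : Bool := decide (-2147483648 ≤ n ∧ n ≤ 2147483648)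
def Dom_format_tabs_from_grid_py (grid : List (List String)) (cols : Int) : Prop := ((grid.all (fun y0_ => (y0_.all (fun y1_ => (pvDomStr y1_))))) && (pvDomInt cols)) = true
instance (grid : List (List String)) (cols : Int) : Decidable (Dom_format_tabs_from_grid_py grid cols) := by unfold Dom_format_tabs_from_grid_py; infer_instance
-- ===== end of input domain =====

-- B regroups the work: it renders each measure once as a reusable block (beat fragment + six
-- string fragments) and a second pass chunks the blocks two per display line — a different
-- decomposition of the same formatting (objective: alternative; same asymptotic cost).
-- ===== PORT A =====
def format_tabs_from_grid_py (grid : List (List String)) (cols : Int) : String :=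
  let string_names : List String := ["e", "B", "G", "D", "A", "E"]
  let slots_per_measure : Int := 16
  let beats_per_measure : Int := 4
  let slots_per_beat : Int := 4
  let measures_per_line : Int := 2
  let num_measures : Int := max 1 (PySem.Int.floordiv (cols + slots_per_measure - 1) slots_per_measure)
  let output : List String :=
    (PySem.List.pyRange 0 num_measures measures_per_line).foldl (fun output line_start =>
      let line_end := min (line_start + measures_per_line) num_measures
      let beat_line : String :=
        (PySem.List.pyRange line_start line_end 1).foldl (fun beat_line _m_idx =>
          ((PySem.List.pyRange 0 beats_per_measure 1).foldl (fun beat_line beat =>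
            beat_line ++ PySem.Int.toStr (beat + 1)
              ++ String.ofList (PySem.List.pyRepeat [' '] (slots_per_beat - 1))) beat_line) ++ " ") "  "
      let beat_line := PySem.Str.rstrip beat_line
      let output := if PySem.Str.strip beat_line ≠ "" then output ++ [beat_line] else output
      let output :=
        (PySem.List.pyRange 0 6 1).foldl (fun output row =>
          let line := PySem.List.pyGetD string_names row "" ++ "|"
          let line :=
            (PySem.List.pyRange line_start line_end 1).foldl (fun line m_idx =>
              let m_start := m_idx * slots_per_measure
              ((PySem.List.pyRange 0 slots_per_measure 1).foldl (fun line slot_offset =>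
                let abs_slot := m_start + slot_offset
                let fret_str :=
                  if abs_slot < cols then
                    (let token := PySem.List.pyGetD (PySem.List.pyGetD grid row []) abs_slot ""
                     if token == "--" then "-" else token)
                  else "-"
                line ++ fret_str) line) ++ "|") line
          output ++ [line]) output
      output ++ [""]) []
  PySem.Str.rstrip (PySem.Str.join "\n" output)

-- ===== PORT B =====
def pvRenderB (grid : List (List String)) (cols : Int) (row m : Int) : String :=
  PySem.Str.join "" ((PySem.List.pyRange 0 16 1).map (fun off =>
    let s := m * 16 + off
    if s < cols then
      (let token := PySem.List.pyGetD (PySem.List.pyGetD grid row []) s ""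
       if token == "--" then "-" else token)
    else "-"))

def pvBlockB (grid : List (List String)) (cols : Int) (m : Int) : String × List String :=
  ("1   2   3   4    ", (PySem.List.pyRange 0 6 1).map (fun row => pvRenderB grid cols row m))

def pvChunkLines : List (String × List String) → List String
  | [] => []
  | b :: rest =>
    let chunk := b :: rest.take 1
    PySem.Str.rstrip ("  " ++ PySem.Str.join "" (chunk.map Prod.fst))
      :: (((PySem.List.pyRange 0 6 1).map (fun row =>
            PySem.List.pyGetD ["e", "B", "G", "D", "A", "E"] row "" ++ "|"
              ++ PySem.Str.join "|" (chunk.map (fun blk => PySem.List.pyGetD blk.2 row "")) ++ "|"))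
          ++ [""] ++ pvChunkLines (rest.drop 1))
termination_by l => l.length
decreasing_by simp

def format_tabs_from_grid_py_alt (grid : List (List String)) (cols : Int) : String :=
  let num_measures : Int := max 1 (PySem.Int.floordiv (cols + 15) 16)
  PySem.Str.rstrip (PySem.Str.join "\n"
    (pvChunkLines ((PySem.List.pyRange 0 num_measures 1).map (pvBlockB grid cols))))

-- ===== PRECONDITION & SPEC =====
-- Pre_ excludes exactly the inputs where Python A raises IndexError: cols > 0 while the grid
-- is missing one of the six string rows or one of those rows is shorter than cols.
def Pre_format_tabs_from_grid_py (grid : List (List String)) (cols : Int) : Prop :=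
  cols ≤ 0 ∨ (6 ≤ grid.length ∧ ∀ r ∈ grid.take 6, cols ≤ (r.length : Int))
instance (grid : List (List String)) (cols : Int) : Decidable (Pre_format_tabs_from_grid_py grid cols) := by
  unfold Pre_format_tabs_from_grid_py; infer_instance

def pvWitness_format_tabs_from_grid_py : List (List String) × Int :=
  ([["--", "3"], ["--", "--"], ["12", "--"], ["--", "--"], ["--", "0"], ["--", "--"]], 2)

def Spec_format_tabs_from_grid_py (grid : List (List String)) (cols : Int) (out : String) : Prop := out = format_tabs_from_grid_py_alt grid cols
instance (grid : List (List String)) (cols : Int) (out : String) : Decidable (Spec_format_tabs_from_grid_py grid cols out) := by unfold Spec_format_tabs_from_grid_py; infer_instance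

-- ===== CLAIM (what is proved, stated in full; the proofs are below) =====
def Claim_equal_format_tabs_from_grid_py : Prop := ∀ (grid : List (List String)) (cols : Int), Dom_format_tabs_from_grid_py grid cols → Pre_format_tabs_from_grid_py grid cols → Spec_format_tabs_from_grid_py grid cols (format_tabs_from_grid_py grid cols)

-- ===== LEMMAS AND PROOFS =====

-- proof-side: one rendered slot (definitionally what both ports compute per slot)
def pvSlot (grid : List (List String)) (cols row s : Int) : String :=
  if s < cols then
    (let token := PySem.List.pyGetD (PySem.List.pyGetD grid row []) s ""
     if token == "--" then "-" else token)
  else "-"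

-- proof-side: the body of A's outer loop (definitionally equal to the port's lambda)
def pvABody (grid : List (List String)) (cols N : Int) (output : List String) (line_start : Int) : List String :=
  let line_end := min (line_start + 2) N
  let beat_line := PySem.Str.rstrip ((PySem.List.pyRange line_start line_end 1).foldl (fun bl _ =>
      ((PySem.List.pyRange 0 4 1).foldl (fun bl beat =>
        bl ++ PySem.Int.toStr (beat + 1) ++ String.ofList (PySem.List.pyRepeat [' '] (4 - 1))) bl) ++ " ") "  ")
  let output := if PySem.Str.strip beat_line ≠ "" then output ++ [beat_line] else output
  let output := (PySem.List.pyRange 0 6 1).foldl (fun output row =>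
      output ++ [(PySem.List.pyRange line_start line_end 1).foldl (fun line m_idx =>
        ((PySem.List.pyRange 0 16 1).foldl (fun line slot_offset =>
          line ++ pvSlot grid cols row (m_idx * 16 + slot_offset)) line) ++ "|")
        (PySem.List.pyGetD ["e", "B", "G", "D", "A", "E"] row "" ++ "|")]) output
  output ++ [""]

def pvFrag : String := "1   2   3   4    "

lemma pvJoin_nil_nil : PySem.Str.join "" [] = "" := by decide

lemma pvJoin_nil_cons (a : String) (l : List String) :
    PySem.Str.join "" (a :: l) = a ++ PySem.Str.join "" l := by
  cases l with
  | nil =>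
    simp only [PySem.Str.join, List.map_cons, List.map_nil, PySem.Chars.join_singleton,
      PySem.Chars.join_nil]
    rw [← String.toList_inj]
    simp
  | cons b t =>
    simp only [PySem.Str.join, List.map_cons, PySem.Chars.join_cons_cons]
    rw [← String.toList_inj]
    simp [String.toList_append]

lemma pvJoin_single (sep a : String) : PySem.Str.join sep [a] = a := by
  simp only [PySem.Str.join, List.map_cons, List.map_nil, PySem.Chars.join_singleton]
  simp

lemma pvJoin_nil_pair (a b : String) : PySem.Str.join "" [a, b] = a ++ b := by
  rw [pvJoin_nil_cons, pvJoin_single]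

lemma pvJoin_bar_pair (a b : String) : PySem.Str.join "|" [a, b] = a ++ "|" ++ b := by
  simp only [PySem.Str.join, List.map_cons, List.map_nil, PySem.Chars.join_cons_cons,
    PySem.Chars.join_singleton]
  rw [← String.toList_inj]
  simp [String.toList_append]

lemma pvFoldl_append_join {α : Type} (f : α → String) :
    ∀ (xs : List α) (init : String),
      xs.foldl (fun a x => a ++ f x) init = init ++ PySem.Str.join "" (xs.map f) := by
  intro xs
  induction xs with
  | nil => intro init; simp [pvJoin_nil_nil]
  | cons x t ih =>
    intro init
    simp only [List.foldl_cons, List.map_cons, pvJoin_nil_cons, ih, String.append_assoc]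

lemma pvBeat_step (bl : String) :
    ((PySem.List.pyRange 0 4 1).foldl (fun bl beat =>
        bl ++ PySem.Int.toStr (beat + 1) ++ String.ofList (PySem.List.pyRepeat [' '] (4 - 1))) bl) ++ " "
      = bl ++ pvFrag := by
  rw [show PySem.List.pyRange 0 4 1 = [0, 1, 2, 3] from by decide]
  simp only [List.foldl_cons, List.foldl_nil, String.append_assoc]
  congr 1

lemma pvSlots_fold (grid : List (List String)) (cols row m : Int) (line : String) :
    (PySem.List.pyRange 0 16 1).foldl (fun line slot_offset =>
        line ++ pvSlot grid cols row (m * 16 + slot_offset)) line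
      = line ++ pvRenderB grid cols row m := by
  rw [pvFoldl_append_join (fun off => pvSlot grid cols row (m * 16 + off)) (PySem.List.pyRange 0 16 1) line]
  rfl

lemma pvChunkLines_nil : pvChunkLines [] = [] := by
  unfold pvChunkLines; rfl

lemma pvChunkLines_one (b : String × List String) :
    pvChunkLines [b]
      = PySem.Str.rstrip ("  " ++ PySem.Str.join "" [b.1])
          :: (((PySem.List.pyRange 0 6 1).map (fun row =>
                PySem.List.pyGetD ["e", "B", "G", "D", "A", "E"] row "" ++ "|"
                  ++ PySem.Str.join "|" [PySem.List.pyGetD b.2 row ""] ++ "|"))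
              ++ [""]) := by
  conv_lhs => rw [pvChunkLines]
  simp [pvChunkLines_nil]

lemma pvChunkLines_pair (b1 b2 : String × List String) (rest : List (String × List String)) :
    pvChunkLines (b1 :: b2 :: rest)
      = (PySem.Str.rstrip ("  " ++ PySem.Str.join "" [b1.1, b2.1])
          :: (((PySem.List.pyRange 0 6 1).map (fun row =>
                PySem.List.pyGetD ["e", "B", "G", "D", "A", "E"] row "" ++ "|"
                  ++ PySem.Str.join "|" [PySem.List.pyGetD b1.2 row "", PySem.List.pyGetD b2.2 row ""] ++ "|"))
              ++ [""])) ++ pvChunkLines rest := by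
  conv_lhs => rw [pvChunkLines]
  simp [List.append_assoc]

set_option maxHeartbeats 1000000 in
lemma pvHead_one (grid : List (List String)) (cols N ls : Int) (h1 : ls < N) (h2 : N ≤ ls + 1)
    (acc : List String) :
    pvABody grid cols N acc ls = acc ++ pvChunkLines [pvBlockB grid cols ls] := by
  have hN : N = ls + 1 := by omega
  subst hN
  simp only [pvABody]
  rw [show min (ls + 2) (ls + 1) = ls + 1 from by omega]
  rw [PySem.List.pyRange_one_singleton]
  simp only [List.foldl_cons, List.foldl_nil]
  rw [pvBeat_step]
  rw [pvChunkLines_one]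
  simp only [pvBlockB, pvJoin_single]
  rw [if_pos (show PySem.Str.strip (PySem.Str.rstrip ("  " ++ pvFrag)) ≠ "" from by decide)]
  rw [PySem.List.foldl_append_singleton_eq_map]
  simp only [List.append_assoc, List.singleton_append]
  refine congrArg (acc ++ ·) ?_
  refine congrArg₂ List.cons rfl ?_
  refine congrArg (· ++ [""]) ?_
  apply List.map_congr_left
  intro row hrow
  rw [PySem.List.mem_pyRange_one] at hrow
  rw [pvSlots_fold, PySem.List.pyGetD_map_pyRange_of_nonneg _ 6 row "" (by omega) (by omega)]

set_option maxHeartbeats 1000000 in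
lemma pvHead_two (grid : List (List String)) (cols N ls : Int) (h2 : ls + 1 < N)
    (acc : List String) :
    pvABody grid cols N acc ls
      = acc ++ pvChunkLines [pvBlockB grid cols ls, pvBlockB grid cols (ls + 1)] := by
  have hr2 : PySem.List.pyRange ls (ls + 2) 1 = [ls, ls + 1] := by
    rw [PySem.List.pyRange_one_cons (by omega), PySem.List.pyRange_one_cons (by omega),
      PySem.List.pyRange_one_eq_nil (by omega)]
  simp only [pvABody]
  rw [show min (ls + 2) N = ls + 2 from by omega, hr2]
  simp only [List.foldl_cons, List.foldl_nil]
  rw [pvBeat_step, pvBeat_step]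
  rw [pvChunkLines_pair]
  simp only [pvBlockB, pvJoin_nil_pair, pvJoin_bar_pair, pvChunkLines_nil, List.append_nil]
  rw [if_pos (show PySem.Str.strip (PySem.Str.rstrip ("  " ++ pvFrag ++ pvFrag)) ≠ "" from by decide)]
  rw [PySem.List.foldl_append_singleton_eq_map]
  simp only [List.append_assoc, List.singleton_append]
  refine congrArg (acc ++ ·) ?_
  refine congrArg₂ List.cons rfl ?_
  refine congrArg (· ++ [""]) ?_
  apply List.map_congr_left
  intro row hrow
  rw [PySem.List.mem_pyRange_one] at hrow
  rw [pvSlots_fold, pvSlots_fold,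
    PySem.List.pyGetD_map_pyRange_of_nonneg _ 6 row "" (by omega) (by omega),
    PySem.List.pyGetD_map_pyRange_of_nonneg _ 6 row "" (by omega) (by omega)]
  simp only [String.append_assoc]

lemma pvRange_two_nil (a b : Int) (h : b ≤ a) : PySem.List.pyRange a b 2 = [] := by
  rw [PySem.List.pyRange_of_pos a b (by omega)]
  rw [if_neg (by omega)]
  simp

lemma pvRange_two_cons (a b : Int) (h : a < b) :
    PySem.List.pyRange a b 2 = a :: PySem.List.pyRange (a + 2) b 2 := by
  rw [PySem.List.pyRange_of_pos a b (by omega), PySem.List.pyRange_of_pos (a + 2) b (by omega)]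
  by_cases h2 : a + 2 < b
  · rw [if_pos h, if_pos h2]
    have hn : ((b - a + 2 - 1) / 2).toNat = ((b - (a + 2) + 2 - 1) / 2).toNat + 1 := by omega
    rw [hn, List.range_succ_eq_map]
    simp only [List.map_cons, List.map_map]
    congr 1
    · simp
    · apply List.map_congr_left
      intro k _
      simp [Function.comp, Nat.succ_eq_add_one]
      ring
  · rw [if_pos h, if_neg h2]
    have hn : ((b - a + 2 - 1) / 2).toNat = 1 := by omega
    rw [hn]
    simp

lemma pvLoop (grid : List (List String)) (cols N : Int) :
    ∀ (n : Nat) (start : Int) (acc : List String), (N - start).toNat = n →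
      (PySem.List.pyRange start N 2).foldl (pvABody grid cols N) acc
        = acc ++ pvChunkLines ((PySem.List.pyRange start N 1).map (pvBlockB grid cols)) := by
  intro n
  induction n using Nat.strong_induction_on with
  | _ n ih =>
    intro start acc hn
    by_cases hlt : start < N
    · by_cases h2 : start + 1 < N
      · rw [pvRange_two_cons start N hlt, List.foldl_cons]
        rw [pvHead_two grid cols N start h2 acc]
        rw [ih (N - (start + 2)).toNat (by omega) (start + 2) _ rfl]
        rw [PySem.List.pyRange_one_cons hlt, PySem.List.pyRange_one_cons h2]
        rw [show start + 1 + 1 = start + 2 from by ring]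
        rw [List.map_cons, List.map_cons, pvChunkLines_pair, pvChunkLines_pair, pvChunkLines_nil]
        simp only [List.append_assoc, List.append_nil]
      · rw [pvRange_two_cons start N hlt, List.foldl_cons]
        rw [pvHead_one grid cols N start hlt (by omega) acc]
        rw [show PySem.List.pyRange (start + 2) N 2 = [] from pvRange_two_nil _ _ (by omega),
          List.foldl_nil]
        rw [PySem.List.pyRange_one_cons hlt,
          show PySem.List.pyRange (start + 1) N 1 = [] from PySem.List.pyRange_one_eq_nil (by omega)]
        rw [List.map_cons, List.map_nil]
    · rw [pvRange_two_nil _ _ (by omega), PySem.List.pyRange_one_eq_nil (by omega)]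
      simp [pvChunkLines_nil]

lemma pvA_eq (grid : List (List String)) (cols : Int) :
    format_tabs_from_grid_py grid cols
      = PySem.Str.rstrip (PySem.Str.join "\n"
          ((PySem.List.pyRange 0 (max 1 (PySem.Int.floordiv (cols + 16 - 1) 16)) 2).foldl
            (pvABody grid cols (max 1 (PySem.Int.floordiv (cols + 16 - 1) 16))) [])) := rfl

-- ===== VERDICT (by name: the statement is the Claim_ definition above) =====
theorem format_tabs_from_grid_py_spec : Claim_equal_format_tabs_from_grid_py := by
  intro grid cols _dom _pre
  unfold Spec_format_tabs_from_grid_py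
  rw [pvA_eq]
  have h15 : cols + 16 - 1 = cols + 15 := by ring
  rw [h15]
  rw [pvLoop grid cols _ ((max 1 (PySem.Int.floordiv (cols + 15) 16)) - 0).toNat 0 [] rfl]
  rfl
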